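-- pv_equiv track=rewrite | github.com/PRONDReconstruct/PROND | generate_memetracker_dataset/hyperlink.py | post_cas2domain_cas
-- ===== SOURCE A (Python) =====
-- def get_domain(full_url):
--     gg_index = full_url.find('//',0,len(full_url))
--     first_g_index = full_url.find('/',gg_index+2,len(full_url))
--     domain = full_url[gg_index+2:first_g_index]
--     return domain
--
-- def post_cas2domain_cas(single_cascade):
--     single_domain_cascade={}
--     for url, utime in single_cascade.items():
--         domain = get_domain(url)
--         if domain in single_domain_cascade.keys():
--             if utime<single_domain_cascade[domain]:
--                 single_domain_cascade[domain]=utime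
--         else:
--             single_domain_cascade[domain]=utime
--     return single_domain_cascade
-- ===== SOURCE B (Python) =====
-- def get_domain(full_url):
--     gg_index = full_url.find('//',0,len(full_url))
--     first_g_index = full_url.find('/',gg_index+2,len(full_url))
--     domain = full_url[gg_index+2:first_g_index]
--     return domain
--
-- def post_cas2domain_cas(single_cascade):
--     # pass 1: group every timestamp under its domain, first-appearance order
--     grouped = {}
--     for url, utime in single_cascade.items():
--         grouped.setdefault(get_domain(url), []).append(utime)
--     # pass 2: reduce each group to its minimum
--     return {domain: min(times) for domain, times in grouped.items()}
-- ===== Notes on version B (the rewrite author's own statement) =====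
-- stated objective: alternative
-- what changed: Replaces the single-pass running-minimum dict update with a two-pass build-then-reduce: first group all timestamps per domain into lists, then take min of each list in a dict comprehension.
import Mathlib
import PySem

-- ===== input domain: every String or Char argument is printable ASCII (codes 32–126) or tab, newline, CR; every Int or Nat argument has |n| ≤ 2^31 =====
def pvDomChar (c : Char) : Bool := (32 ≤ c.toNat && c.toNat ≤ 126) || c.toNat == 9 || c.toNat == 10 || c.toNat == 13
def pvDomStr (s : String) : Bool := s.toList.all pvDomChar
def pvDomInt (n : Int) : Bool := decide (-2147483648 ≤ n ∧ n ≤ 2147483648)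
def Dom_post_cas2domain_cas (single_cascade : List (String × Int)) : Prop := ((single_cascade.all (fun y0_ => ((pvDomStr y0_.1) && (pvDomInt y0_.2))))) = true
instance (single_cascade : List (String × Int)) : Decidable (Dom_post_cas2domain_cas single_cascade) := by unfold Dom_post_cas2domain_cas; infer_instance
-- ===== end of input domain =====

-- B changes the decomposition: A keeps a running minimum per domain in one pass; B first
-- groups all timestamps per domain into lists, then reduces each list with min (alternative, not faster).

-- ===== PORT A =====
-- shared helper, identical in both Python sources
def get_domain (full_url : String) : String :=
  let gg_index := PySem.Str.findFrom full_url "//" 0 (some (PySem.Str.len full_url))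
  let first_g_index := PySem.Str.findFrom full_url "/" (gg_index + 2) (some (PySem.Str.len full_url))
  PySem.Str.slice full_url (some (gg_index + 2)) (some first_g_index)

def post_cas2domain_cas (single_cascade : List (String × Int)) : List (String × Int) :=
  (single_cascade.foldl
    (fun single_domain_cascade p =>
      let domain := get_domain p.1
      if single_domain_cascade.contains domain then
        if p.2 < single_domain_cascade.getD domain 0 then
          single_domain_cascade.insert domain p.2
        else single_domain_cascade
      else single_domain_cascade.insert domain p.2)
    PySem.Dict.empty).items

-- ===== PORT B =====
-- min(times): Python min over a list of ints (the lists B builds are never empty)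
def pvMinD (ts : List Int) : Int := (PySem.List.min? ts (fun x => x)).getD 0

def post_cas2domain_cas_alt (single_cascade : List (String × Int)) : List (String × Int) :=
  let grouped : PySem.Dict String (List Int) :=
    single_cascade.foldl
      (fun grouped p => grouped.modify (get_domain p.1) [] (fun ts => ts ++ [p.2]))
      PySem.Dict.empty
  grouped.items.map (fun q => (q.1, pvMinD q.2))

-- ===== PRECONDITION & SPEC =====
-- Pre_ requires pairwise-distinct URL keys: the Python argument is a dict, which cannot
-- contain duplicate keys, so association lists with a repeated URL do not encode any Python input.
def Pre_post_cas2domain_cas (single_cascade : List (String × Int)) : Prop :=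
  (single_cascade.map Prod.fst).Nodup
instance (single_cascade : List (String × Int)) : Decidable (Pre_post_cas2domain_cas single_cascade) := by unfold Pre_post_cas2domain_cas; infer_instance

def pvWitness_post_cas2domain_cas : (List (String × Int)) :=
  [("http://a.com/x", 5), ("http://a.com/y", 3), ("http://b.org/", 7)]

def Spec_post_cas2domain_cas (single_cascade : List (String × Int)) (out : List (String × Int)) : Prop := out = post_cas2domain_cas_alt single_cascade
instance (single_cascade : List (String × Int)) (out : List (String × Int)) : Decidable (Spec_post_cas2domain_cas single_cascade out) := by unfold Spec_post_cas2domain_cas; infer_instance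

-- ===== CLAIM (what is proved, stated in full; the proofs are below) =====
def Claim_equal_post_cas2domain_cas : Prop := ∀ (single_cascade : List (String × Int)), Dom_post_cas2domain_cas single_cascade → Pre_post_cas2domain_cas single_cascade → Spec_post_cas2domain_cas single_cascade (post_cas2domain_cas single_cascade)

-- ===== LEMMAS AND PROOFS =====

-- min(ts ++ [u]) is the running-min update, for nonempty ts
lemma pvMinD_append (ts : List Int) (h : ts ≠ []) (u : Int) :
    pvMinD (ts ++ [u]) = if u < pvMinD ts then u else pvMinD ts := by
  obtain ⟨x, t, rfl⟩ := List.exists_cons_of_ne_nil h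
  simp [pvMinD, PySem.List.min?_id_cons, List.foldl_append]
  omega

lemma pvMinD_singleton (u : Int) : pvMinD [u] = u := by
  simp [pvMinD, PySem.List.min?_id_cons]

lemma contains_mk_map (L : List (String × List Int)) (k : String) :
    (PySem.Dict.mk (L.map (fun q => (q.1, pvMinD q.2)))).contains k = (PySem.Dict.mk L).contains k := by
  simp [PySem.Dict.contains, List.any_map, Function.comp_def]

lemma find?_mk_map (L : List (String × List Int)) (k : String) :
    List.find? (fun p => p.1 == k) (L.map (fun q => (q.1, pvMinD q.2)))
      = (List.find? (fun p => p.1 == k) L).map (fun q => (q.1, pvMinD q.2)) := by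
  rw [List.find?_map]; rfl

lemma get?_none_of_not_contains (L : List (String × List Int)) (k : String)
    (hc : ¬ (PySem.Dict.mk L).contains k = true) :
    (PySem.Dict.mk L).get? k = none := by
  simp only [PySem.Dict.contains, List.any_eq_true] at hc
  push_neg at hc
  simp only [PySem.Dict.get?, PySem.Dict.items]
  rw [List.find?_eq_none.mpr hc]
  rfl

lemma keys_not_mem_of_not_contains (L : List (String × List Int)) (k : String)
    (hc : ¬ (PySem.Dict.mk L).contains k = true) :
    k ∉ L.map Prod.fst := by
  simp only [PySem.Dict.contains, List.any_eq_true] at hc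
  push_neg at hc
  intro hmem
  obtain ⟨q, hq, hq1⟩ := List.mem_map.mp hmem
  exact hc q hq (by simp [hq1])

-- one loop step: A's update on the min-image equals the min-image of B's grouping update
lemma step_eq (g : PySem.Dict String (List Int))
    (hnd : (g.items.map Prod.fst).Nodup) (hne : ∀ q ∈ g.items, q.2 ≠ [])
    (k : String) (u : Int) :
    (let d := PySem.Dict.mk (g.items.map (fun q => (q.1, pvMinD q.2)))
     if d.contains k then
       if u < d.getD k 0 then d.insert k u else d
     else d.insert k u)
    = PySem.Dict.mk ((g.modify k [] (fun ts => ts ++ [u])).items.map (fun q => (q.1, pvMinD q.2))) := by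
  obtain ⟨L⟩ := g
  simp only [contains_mk_map]
  by_cases hc : (PySem.Dict.mk L).contains k = true
  · -- key present: B rewrites the unique matching entry
    obtain ⟨r, hr⟩ : ∃ r, List.find? (fun p => p.1 == k) L = some r := by
      simp only [PySem.Dict.contains, List.any_eq_true] at hc
      obtain ⟨q, hq, hqk⟩ := hc
      exact Option.isSome_iff_exists.mp (List.find?_isSome.mpr ⟨q, hq, hqk⟩)
    have hrk : r.1 = k := by simpa using List.find?_some hr
    have hrmem : r ∈ L := List.mem_of_find?_eq_some hr
    have hrne : r.2 ≠ [] := hne r hrmem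
    have hgetD : (PySem.Dict.mk L).getD k [] = r.2 := by
      simp [PySem.Dict.getD, PySem.Dict.get?, hr]
    have hgetDm : (PySem.Dict.mk (L.map (fun q => (q.1, pvMinD q.2)))).getD k 0 = pvMinD r.2 := by
      simp only [PySem.Dict.getD, PySem.Dict.get?, find?_mk_map, hr,
        Option.map_some, Option.getD_some]
    have hmod : (PySem.Dict.mk L).modify k [] (fun ts => ts ++ [u])
        = PySem.Dict.mk (L.map (fun p => if p.1 == k then (k, r.2 ++ [u]) else p)) := by
      simp only [PySem.Dict.modify, hgetD, PySem.Dict.insert, hc, if_true]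
    rw [hmod]
    rw [if_pos hc, hgetDm]
    by_cases hu : u < pvMinD r.2
    · rw [if_pos hu]
      have hcm : (PySem.Dict.mk (L.map (fun q => (q.1, pvMinD q.2)))).contains k = true := by
        rw [contains_mk_map]; exact hc
      have hins : (PySem.Dict.mk (L.map (fun q => (q.1, pvMinD q.2)))).insert k u
          = PySem.Dict.mk ((L.map (fun q => (q.1, pvMinD q.2))).map
              (fun p => if p.1 == k then (k, u) else p)) := by
        simp only [PySem.Dict.insert, hcm, if_true]
      rw [hins]
      congr 1
      rw [List.map_map, List.map_map]
      apply List.map_congr_left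
      intro q _
      by_cases hq1 : q.1 = k
      · simp [Function.comp_def, hq1, pvMinD_append r.2 hrne u, hu]
      · simp [Function.comp_def, hq1]
    · rw [if_neg hu]
      congr 1
      rw [List.map_map]
      symm
      apply List.map_congr_left
      intro q hq
      by_cases hq1 : q.1 = k
      · have hqr : q = r := List.inj_on_of_nodup_map hnd hq hrmem (by rw [hq1, hrk])
        subst hqr
        simp [Function.comp_def, hq1, pvMinD_append q.2 hrne u, hu]
      · simp [Function.comp_def, hq1]
  · -- key absent: both sides append a fresh entry
    have hcf : (PySem.Dict.mk L).contains k = false := Bool.eq_false_iff.mpr hc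
    have hgetD0 : (PySem.Dict.mk L).getD k [] = [] := by
      simp [PySem.Dict.getD, get?_none_of_not_contains L k hc]
    have hmod : (PySem.Dict.mk L).modify k [] (fun ts => ts ++ [u])
        = PySem.Dict.mk (L ++ [(k, [] ++ [u])]) := by
      simp only [PySem.Dict.modify, hgetD0, PySem.Dict.insert, hcf, Bool.false_eq_true, if_false]
    rw [hmod, if_neg hc]
    have hcm : (PySem.Dict.mk (L.map (fun q => (q.1, pvMinD q.2)))).contains k = false := by
      rw [contains_mk_map]; exact hcf
    have hins : (PySem.Dict.mk (L.map (fun q => (q.1, pvMinD q.2)))).insert k u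
        = PySem.Dict.mk (L.map (fun q => (q.1, pvMinD q.2)) ++ [(k, u)]) := by
      simp only [PySem.Dict.insert, hcm, Bool.false_eq_true, if_false]
    rw [hins]
    simp [pvMinD_singleton]

-- B's grouping step keeps domain keys distinct
lemma nodup_modify (g : PySem.Dict String (List Int))
    (hnd : (g.items.map Prod.fst).Nodup) (k : String) (u : Int) :
    (((g.modify k [] (fun ts => ts ++ [u])).items.map Prod.fst)).Nodup := by
  obtain ⟨L⟩ := g
  by_cases hc : (PySem.Dict.mk L).contains k = true
  · have hitems : ((PySem.Dict.mk L).modify k [] (fun ts => ts ++ [u])).items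
        = L.map (fun p => if p.1 == k then (k, ((PySem.Dict.mk L).getD k []) ++ [u]) else p) := by
      simp only [PySem.Dict.modify, PySem.Dict.insert, hc, if_true]
    rw [hitems, List.map_map]
    have hmap : L.map (Prod.fst ∘ (fun p => if p.1 == k then (k, ((PySem.Dict.mk L).getD k []) ++ [u]) else p))
        = L.map Prod.fst := by
      apply List.map_congr_left
      intro q _
      by_cases hq1 : q.1 = k
      · simp [Function.comp_def, hq1]
      · simp [Function.comp_def, hq1]
    rw [hmap]
    exact hnd
  · have hcf : (PySem.Dict.mk L).contains k = false := Bool.eq_false_iff.mpr hc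
    have hgetD0 : (PySem.Dict.mk L).getD k [] = [] := by
      simp [PySem.Dict.getD, get?_none_of_not_contains L k hc]
    have hitems : ((PySem.Dict.mk L).modify k [] (fun ts => ts ++ [u])).items
        = L ++ [(k, [] ++ [u])] := by
      simp only [PySem.Dict.modify, hgetD0, PySem.Dict.insert, hcf, Bool.false_eq_true, if_false]
    rw [hitems]
    simp only [List.map_append, List.map_cons, List.map_nil]
    refine List.Nodup.append hnd (List.nodup_singleton k) ?_
    intro a ha hb
    rw [List.mem_singleton] at hb
    exact keys_not_mem_of_not_contains L k hc (hb ▸ ha)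

-- B's grouping step keeps every stored list nonempty
lemma ne_modify (g : PySem.Dict String (List Int))
    (hne : ∀ q ∈ g.items, q.2 ≠ []) (k : String) (u : Int) :
    ∀ q ∈ (g.modify k [] (fun ts => ts ++ [u])).items, q.2 ≠ [] := by
  intro q hq
  obtain ⟨L⟩ := g
  simp only [PySem.Dict.modify, PySem.Dict.insert] at hq
  split at hq
  · simp only [PySem.Dict.items, List.mem_map] at hq
    obtain ⟨p, hp, rfl⟩ := hq
    by_cases hp1 : p.1 = k
    · simp [hp1]
    · simpa [hp1] using hne p hp
  · simp only [PySem.Dict.items, List.mem_append, List.mem_cons, List.not_mem_nil, or_false] at hq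
    rcases hq with h | h
    · exact hne q h
    · subst h; simp

-- the whole loop: A's fold on the min-image equals the min-image of B's grouping fold
lemma loop_eq (sc : List (String × Int)) (g : PySem.Dict String (List Int))
    (hnd : (g.items.map Prod.fst).Nodup) (hne : ∀ q ∈ g.items, q.2 ≠ []) :
    sc.foldl
      (fun single_domain_cascade p =>
        let domain := get_domain p.1
        if single_domain_cascade.contains domain then
          if p.2 < single_domain_cascade.getD domain 0 then
            single_domain_cascade.insert domain p.2
          else single_domain_cascade
        else single_domain_cascade.insert domain p.2)
      (PySem.Dict.mk (g.items.map (fun q => (q.1, pvMinD q.2))))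
    = PySem.Dict.mk ((sc.foldl
        (fun grouped p => grouped.modify (get_domain p.1) [] (fun ts => ts ++ [p.2])) g).items.map
        (fun q => (q.1, pvMinD q.2))) := by
  induction sc generalizing g with
  | nil => rfl
  | cons p sc ih =>
    simp only [List.foldl_cons]
    rw [step_eq g hnd hne (get_domain p.1) p.2]
    exact ih _ (nodup_modify g hnd _ _) (ne_modify g hne _ _)

-- ===== VERDICT (by name: the statement is the Claim_ definition above) =====
theorem post_cas2domain_cas_spec : Claim_equal_post_cas2domain_cas := by
  intro sc _ _
  show post_cas2domain_cas sc = post_cas2domain_cas_alt sc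
  unfold post_cas2domain_cas post_cas2domain_cas_alt
  rw [show (PySem.Dict.empty : PySem.Dict String Int)
        = PySem.Dict.mk (((PySem.Dict.empty : PySem.Dict String (List Int)).items).map
            (fun q => (q.1, pvMinD q.2))) from rfl,
      loop_eq sc PySem.Dict.empty (by simp [PySem.Dict.empty]) (by simp [PySem.Dict.empty])]
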